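-- pv_equiv track=rewrite | github.com/awshx/blind_people | pts_communs.py | lenghtLetter
-- ===== SOURCE A (Python) =====
-- def lenghtLetter(word):
--   #Length of the word
--   wordLength = 0
--   #Length of a standard letter (low case and not a double letter like m or w)
--   lenghtLetter = 17
--   #We cut the word into a list of letters
--   letters = list(word)
--   #for every letter of the word
--   for letter in letters:
--     #We check if it's a 'm' or a 'w'
--     if (letter == 'm' or letter == 'w' or letter == 'M' or letter == 'W'):
--       #If so, we increase the length even more than if it was a standard letter
--       wordLength = wordLength + 5
--     #If the letter is in uppercase
--     if (letter.isupper()):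
--       #we increase the length even more than if it was a standard letter
--       wordLength = wordLength + 3
--     #We increase the length of the word each at each letter
--     wordLength = wordLength + lenghtLetter
--   #We return the final number corresponding to the length of the word
--   return wordLength
-- ===== SOURCE B (Python) =====
-- def lenghtLetter(word):
--     letters = list(word)
--     n = sum(1 for _ in letters)
--     mw = sum(1 for c in letters if c in ('m', 'w', 'M', 'W'))
--     up = sum(1 for c in letters if c.isupper())
--     return 17 * n + 5 * mw + 3 * up
-- ===== Notes on version B (the rewrite author's own statement) =====
-- stated objective: simpler
-- what changed: Replaces the single interleaved accumulation loop by three independent counts (letters, m/w letters, uppercase letters) combined in one closed arithmetic formula 17*n + 5*mw + 3*up.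
import Mathlib
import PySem

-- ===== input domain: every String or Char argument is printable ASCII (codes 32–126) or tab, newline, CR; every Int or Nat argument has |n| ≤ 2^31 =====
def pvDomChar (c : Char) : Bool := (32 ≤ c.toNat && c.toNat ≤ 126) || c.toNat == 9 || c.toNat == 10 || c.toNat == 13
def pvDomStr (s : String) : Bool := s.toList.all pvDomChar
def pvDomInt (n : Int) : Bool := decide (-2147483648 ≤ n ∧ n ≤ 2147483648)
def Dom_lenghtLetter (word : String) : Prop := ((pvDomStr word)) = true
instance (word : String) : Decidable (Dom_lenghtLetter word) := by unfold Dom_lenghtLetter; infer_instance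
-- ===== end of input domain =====

-- ===== PORT A =====
-- B computes the same weighted length as a closed-form combination of three independent counts (objective: simpler).
def lenghtLetterStep (acc : Int) (letter : Char) : Int :=
  let acc := if letter = 'm' ∨ letter = 'w' ∨ letter = 'M' ∨ letter = 'W' then acc + 5 else acc
  let acc := if PySem.Chars.isupper letter then acc + 3 else acc
  acc + 17

def lenghtLetter (word : String) : Int :=
  word.toList.foldl lenghtLetterStep 0

-- ===== PORT B =====
def lenghtLetter_alt (word : String) : Int :=
  let letters := word.toList
  let n : Int := (letters.map (fun _ => (1:Int))).sum
  let mw : Int := ((letters.filter (fun c => c = 'm' ∨ c = 'w' ∨ c = 'M' ∨ c = 'W')).map (fun _ => (1:Int))).sum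
  let up : Int := ((letters.filter (fun c => PySem.Chars.isupper c)).map (fun _ => (1:Int))).sum
  17 * n + 5 * mw + 3 * up

-- ===== PRECONDITION & SPEC =====
def Spec_lenghtLetter (word : String) (out : Int) : Prop := out = lenghtLetter_alt word
instance (word : String) (out : Int) : Decidable (Spec_lenghtLetter word out) := by unfold Spec_lenghtLetter; infer_instance

-- ===== CLAIM (what is proved, stated in full; the proofs are below) =====
def Claim_equal_lenghtLetter : Prop := ∀ (word : String), Dom_lenghtLetter word → Spec_lenghtLetter word (lenghtLetter word)

-- ===== LEMMAS AND PROOFS =====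

-- ===== VERDICT (by name: the statement is the Claim_ definition above) =====
theorem foldl_step (l : List Char) (acc : Int) :
    l.foldl lenghtLetterStep acc = acc + l.foldl lenghtLetterStep 0 := by
  induction l generalizing acc with
  | nil => simp
  | cons c t ih =>
    simp only [List.foldl_cons]
    rw [ih, ih (lenghtLetterStep 0 c)]
    simp only [lenghtLetterStep]
    split_ifs <;> ring

theorem fold_closed (l : List Char) :
    l.foldl lenghtLetterStep 0 =
      17 * ((l.map (fun _ => (1:Int))).sum)
      + 5 * (((l.filter (fun c => c = 'm' ∨ c = 'w' ∨ c = 'M' ∨ c = 'W')).map (fun _ => (1:Int))).sum)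
      + 3 * (((l.filter (fun c => PySem.Chars.isupper c)).map (fun _ => (1:Int))).sum) := by
  induction l with
  | nil => simp
  | cons c t ih =>
    simp only [List.foldl_cons, List.map_cons, List.filter_cons]
    rw [foldl_step, ih]
    simp only [lenghtLetterStep]
    by_cases hmw : c = 'm' ∨ c = 'w' ∨ c = 'M' ∨ c = 'W' <;>
      by_cases hu : PySem.Chars.isupper c = true <;>
        simp only [hmw, hu, decide_true, decide_false,
          List.map_cons, List.sum_cons, if_pos, if_neg, not_false_iff] <;>
        simp <;> ring

theorem lenghtLetter_spec : Claim_equal_lenghtLetter := by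
  intro word _
  unfold Spec_lenghtLetter lenghtLetter lenghtLetter_alt
  exact fold_closed word.toList
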